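-- pv_equiv track=rewrite | github.com/Carolay28/min_cuadrados_resuelto | min_cuadrados_resuelto.py | der_parcial_q2
-- ===== SOURCE A (Python) =====
-- def der_parcial_q2(xs, ys):
--     c2 = 0
--     c1 = 0
--     c0 = 0
--     c_ind = 0
--     for xi, yi in zip(xs, ys):
--         c2 += xi**4
--         c1 += xi**3
--         c0 += xi**2
--         c_ind += yi * xi**2
--     return (c2, c1, c0, c_ind)
-- ===== SOURCE B (Python) =====
-- def der_parcial_q2(xs, ys):
--     pairs = list(zip(xs, ys))
--     x2 = [x * x for x, _ in pairs]
--     c2 = sum(a * a for a in x2)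
--     c1 = sum(a * p[0] for a, p in zip(x2, pairs))
--     c0 = sum(x2)
--     c_ind = sum(a * p[1] for a, p in zip(x2, pairs))
--     return (c2, c1, c0, c_ind)
-- ===== Notes on version B (the rewrite author's own statement) =====
-- stated objective: alternative
-- what changed: Replaces the single fused accumulation loop with a precomputed list of squares xi*xi plus four independent sum() passes that reuse those squares (x^4 = x2*x2, x^3 = x2*x, x^2 = x2), so no power operator and no running 4-tuple state.
import Mathlib
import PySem

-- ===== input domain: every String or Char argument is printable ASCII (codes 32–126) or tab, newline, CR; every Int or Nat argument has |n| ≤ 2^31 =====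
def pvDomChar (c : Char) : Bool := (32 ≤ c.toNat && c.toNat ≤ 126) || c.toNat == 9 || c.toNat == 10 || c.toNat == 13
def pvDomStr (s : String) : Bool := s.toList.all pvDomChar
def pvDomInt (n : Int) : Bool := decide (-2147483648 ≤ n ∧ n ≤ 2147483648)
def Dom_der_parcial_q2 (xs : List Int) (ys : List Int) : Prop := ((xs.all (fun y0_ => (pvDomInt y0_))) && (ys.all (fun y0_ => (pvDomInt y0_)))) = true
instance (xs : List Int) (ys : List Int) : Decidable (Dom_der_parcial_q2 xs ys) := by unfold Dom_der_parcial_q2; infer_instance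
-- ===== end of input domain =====

-- B replaces A's fused accumulation loop by a precomputed list of squares and four independent summation passes (objective: alternative decomposition, same cost).

-- ===== PORT A =====
def der_parcial_q2 (xs : List Int) (ys : List Int) : Int × Int × Int × Int :=
  (xs.zip ys).foldl
    (fun (c : Int × Int × Int × Int) p =>
      (c.1 + p.1 ^ 4, c.2.1 + p.1 ^ 3, c.2.2.1 + p.1 ^ 2, c.2.2.2 + p.2 * p.1 ^ 2))
    (0, 0, 0, 0)

-- ===== PORT B =====
def der_parcial_q2_alt (xs : List Int) (ys : List Int) : Int × Int × Int × Int :=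
  let pairs := xs.zip ys
  let x2 := pairs.map (fun p => p.1 * p.1)
  (((x2.map (fun a => a * a)).sum),
   (((x2.zip pairs).map (fun q => q.1 * q.2.1)).sum),
   (x2.sum),
   (((x2.zip pairs).map (fun q => q.1 * q.2.2)).sum))

-- ===== PRECONDITION & SPEC =====
def Spec_der_parcial_q2 (xs : List Int) (ys : List Int) (out : Int × Int × Int × Int) : Prop := out = der_parcial_q2_alt xs ys
instance (xs : List Int) (ys : List Int) (out : Int × Int × Int × Int) : Decidable (Spec_der_parcial_q2 xs ys out) := by unfold Spec_der_parcial_q2; infer_instance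

-- ===== CLAIM (what is proved, stated in full; the proofs are below) =====
def Claim_equal_der_parcial_q2 : Prop := ∀ (xs : List Int) (ys : List Int), Dom_der_parcial_q2 xs ys → Spec_der_parcial_q2 xs ys (der_parcial_q2 xs ys)

-- ===== LEMMAS AND PROOFS =====

-- zip of the mapped squares with the pair list itself, as one map
theorem pv_zip_map_self {α β : Type} (f : α → β) (l : List α) :
    (l.map f).zip l = l.map (fun p => (f p, p)) := by
  induction l with
  | nil => rfl
  | cons h t ih => simp [ih]

-- A's fold from an arbitrary accumulator equals accumulator plus B's four sums
theorem pv_fold_eq (l : List (Int × Int)) : ∀ (a b c d : Int),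
    l.foldl
      (fun (c : Int × Int × Int × Int) p =>
        (c.1 + p.1 ^ 4, c.2.1 + p.1 ^ 3, c.2.2.1 + p.1 ^ 2, c.2.2.2 + p.2 * p.1 ^ 2))
      (a, b, c, d)
    = (a + ((l.map (fun p => (p.1 * p.1) * (p.1 * p.1))).sum),
       b + ((l.map (fun p => (p.1 * p.1) * p.1)).sum),
       c + ((l.map (fun p => p.1 * p.1)).sum),
       d + ((l.map (fun p => (p.1 * p.1) * p.2)).sum)) := by
  induction l with
  | nil => intro a b c d; simp
  | cons h t ih =>
    intro a b c d
    simp only [List.foldl_cons, List.map_cons, List.sum_cons, ih, Prod.mk.injEq]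
    refine ⟨by ring, by ring, by ring, by ring⟩

-- ===== VERDICT (by name: the statement is the Claim_ definition above) =====
theorem der_parcial_q2_spec : Claim_equal_der_parcial_q2 := by
  intro xs ys _
  unfold Spec_der_parcial_q2 der_parcial_q2 der_parcial_q2_alt
  simp only [pv_zip_map_self, List.map_map, pv_fold_eq]
  simp [Function.comp_def]
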